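-- pv_equiv track=rewrite | github.com/Ricky-Hu5918/Python-Lab | 434_Number_of_Segments_in_a_String.py | countSegments1
-- ===== SOURCE A (Python) =====
-- def countSegments1(s: str) -> int:
--     idx, tmp = 0, ''
--     count = 0
--
--     while (idx < len(s)):
--         if s[idx] != ' ':
--             tmp += s[idx]
--         else:
--             if (tmp != ''):
--                 count += 1
--                 tmp = ''
--
--         idx += 1
--
--     return count if not tmp else count + 1
-- ===== SOURCE B (Python) =====
-- def countSegments1(s: str) -> int:
--     return len([w for w in s.split(' ') if w])
-- ===== Notes on version B (the rewrite author's own statement) =====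
-- stated objective: faster
-- what changed: Replaced the character-by-character scan that accumulates a string buffer and a counter with splitting on the single-space separator and counting the non-empty pieces.
import Mathlib
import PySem

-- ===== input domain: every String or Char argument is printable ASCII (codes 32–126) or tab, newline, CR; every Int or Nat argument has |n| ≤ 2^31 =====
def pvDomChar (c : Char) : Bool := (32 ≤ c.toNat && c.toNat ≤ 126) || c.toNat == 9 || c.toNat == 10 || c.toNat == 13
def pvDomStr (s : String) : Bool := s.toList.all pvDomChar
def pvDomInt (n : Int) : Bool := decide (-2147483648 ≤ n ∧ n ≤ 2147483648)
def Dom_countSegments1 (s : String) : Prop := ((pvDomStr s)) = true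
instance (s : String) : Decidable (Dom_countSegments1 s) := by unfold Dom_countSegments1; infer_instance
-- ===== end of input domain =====

-- B replaces A's character-by-character buffer-accumulating scan with split(' ') then counting
-- the non-empty pieces (measurably faster: one library split instead of a per-character interpreted loop).

-- ===== PORT A =====
-- A's while-loop over the indices, carried as structural recursion over the characters:
-- state is (tmp, count) exactly as in the Python.
def countSegments1Loop (l : List Char) (tmp : List Char) (count : Int) : Int :=
  match l with
  | [] => if tmp = [] then count else count + 1
  | c :: rest =>
      if c ≠ ' ' then countSegments1Loop rest (tmp ++ [c]) count
      else if tmp ≠ [] then countSegments1Loop rest [] (count + 1)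
      else countSegments1Loop rest tmp count

def countSegments1 (s : String) : Int :=
  countSegments1Loop s.toList [] 0

-- ===== PORT B =====
-- len([w for w in s.split(' ') if w])
def countSegments1_alt (s : String) : Int :=
  (((PySem.Chars.splitOn s.toList [' ']).filter (fun w => w ≠ [])).length : Int)

-- ===== PRECONDITION & SPEC =====
def Spec_countSegments1 (s : String) (out : Int) : Prop := out = countSegments1_alt s
instance (s : String) (out : Int) : Decidable (Spec_countSegments1 s out) := by unfold Spec_countSegments1; infer_instance

-- ===== CLAIM (what is proved, stated in full; the proofs are below) =====
def Claim_equal_countSegments1 : Prop := ∀ (s : String), Dom_countSegments1 s → Spec_countSegments1 s (countSegments1 s)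

-- ===== LEMMAS AND PROOFS =====

theorem countSegments1Loop_add (l : List Char) (tmp : List Char) (count : Int) :
    countSegments1Loop l tmp count = count + countSegments1Loop l tmp 0 := by
  induction l generalizing tmp count with
  | nil => simp [countSegments1Loop]; split_ifs <;> ring
  | cons c rest ih =>
      simp only [countSegments1Loop]
      split_ifs with h1 h2
      · exact ih _ _
      · rw [ih _ (count + 1), ih _ (0 + 1)]; ring
      · exact ih _ _

theorem go_spec (fuel : Nat) (l cur : List Char) (acc : List (List Char))
    (h : l.length < fuel) :
    (((PySem.Chars.splitOn.go [' '] fuel l cur acc).filter (fun w => w ≠ [])).length : Int)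
      = ((acc.filter (fun w => w ≠ [])).length : Int) + countSegments1Loop l cur.reverse 0 := by
  induction fuel generalizing l cur acc with
  | zero => omega
  | succ fuel ih =>
      cases l with
      | nil =>
          simp [PySem.Chars.splitOn.go, countSegments1Loop, List.filter_reverse]
          by_cases hc : cur = [] <;> simp [hc]
      | cons c rest =>
          by_cases hc : c = ' '
          · subst hc
            have hpre : List.isPrefixOf [' '] (' ' :: rest) = true := by
              simp [List.isPrefixOf]
            simp only [PySem.Chars.splitOn.go, hpre, if_true, List.length_cons, List.drop, List.length_nil]
            rw [ih rest [] (cur.reverse :: acc) (by simpa using Nat.lt_of_succ_lt_succ h)]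
            by_cases hcur : cur = []
            · simp [hcur, countSegments1Loop]
            · have hcr : cur.reverse ≠ [] := by simpa using hcur
              simp only [List.filter_cons, decide_eq_true_eq, if_pos hcr, List.length_cons,
                List.reverse_nil, countSegments1Loop]
              rw [countSegments1Loop_add rest [] (0 + 1)]
              push_cast
              ring
          · have hpre : List.isPrefixOf [' '] (c :: rest) = false := by
              simp [List.isPrefixOf]
              exact fun hh => hc hh.symm
            simp only [PySem.Chars.splitOn.go, hpre]
            rw [if_neg (by simp)]
            rw [ih rest (c :: cur) acc (by simpa using Nat.lt_of_succ_lt_succ h)]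
            simp only [countSegments1Loop, List.reverse_cons]
            rw [if_pos hc]

-- ===== VERDICT (by name: the statement is the Claim_ definition above) =====
theorem countSegments1_spec : Claim_equal_countSegments1 := by
  intro s _
  unfold Spec_countSegments1 countSegments1 countSegments1_alt PySem.Chars.splitOn
  rw [go_spec (s.toList.length + 1) s.toList [] [] (Nat.lt_succ_self _)]
  simp
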